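-- pv_equiv track=rewrite | github.com/fmiguezo/ejercicios-python-unsam | Clase04/propaga.py | propagar
-- ===== SOURCE A (Python) =====
-- def propagar(lista):
--     for i, f in enumerate(lista):  # recorro la lista
--         if (f == 1) and (i < len(lista) - 1) and (lista[i + 1] == 0):
--             lista[i + 1] = 1
--         for i in range(len(lista)):  # recorro a la izquierda
--             if (lista[i] == 1) and (lista[i - 1] == 0):
--                 lista[i - 1] = 1
--                 i -= 1
--     return lista
-- ===== SOURCE B (Python) =====
-- def propagar(lista):
--     # Two linear carry passes instead of A's quadratic nested sweeps.
--     # Mutates lista in place and returns it, like A.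
--     n = len(lista)
--     # rightward: a 1 fills the 0s directly to its right (no wraparound)
--     carry = False
--     for j in range(n):
--         x = lista[j]
--         if x == 1:
--             carry = True
--         elif x == 0:
--             if carry:
--                 lista[j] = 1
--         else:
--             carry = False
--     # leftward: a 1 fills the 0s to its left; index -1 wraps, so go around twice
--     carry = False
--     for j in range(2 * n - 1, -1, -1):
--         x = lista[j % n]
--         if x == 1:
--             carry = True
--         elif x == 0:
--             if carry:
--                 lista[j % n] = 1
--         else:
--             carry = False
--     return lista
-- ===== Notes on version B (the rewrite author's own statement) =====
-- stated objective: faster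
-- what changed: A saturates 1s by re-running a full leftward sweep (with circular lista[-1] wraparound) inside the outer scan, O(n^2) passes; B replaces this with one forward carry pass (rightward fill) and one doubled backward carry pass (leftward fill across the wrap), two O(n) passes in total.
import Mathlib
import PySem

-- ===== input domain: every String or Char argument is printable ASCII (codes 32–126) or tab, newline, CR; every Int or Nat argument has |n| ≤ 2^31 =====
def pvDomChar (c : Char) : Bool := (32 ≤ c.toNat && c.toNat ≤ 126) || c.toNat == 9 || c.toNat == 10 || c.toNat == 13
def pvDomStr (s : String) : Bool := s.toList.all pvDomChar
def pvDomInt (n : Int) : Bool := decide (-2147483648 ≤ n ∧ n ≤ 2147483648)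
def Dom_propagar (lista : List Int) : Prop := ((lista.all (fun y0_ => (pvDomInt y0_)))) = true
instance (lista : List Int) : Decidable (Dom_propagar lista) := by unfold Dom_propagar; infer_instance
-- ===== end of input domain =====

-- B replaces A's quadratic nested saturation sweeps by two linear carry passes.
-- Both Pythons mutate `lista` in place the same way and return it; the theorems are about the returned value.

-- ===== PORT A =====
-- inner loop: `for i in range(len(lista)): if lista[i]==1 and lista[i-1]==0: lista[i-1]=1`
-- (the `i -= 1` in A's body has no effect: `i` is rebound by the next loop iteration).
-- All indices used are in range (-len ≤ i-1 < len), so the total pyGetD/pySetD forms are exact.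
def propagarInner (s : List Int) : List Int :=
  (PySem.List.pyRange 0 (s.length : Int) 1).foldl
    (fun t i =>
      if PySem.List.pyGetD t i 0 = 1 ∧ PySem.List.pyGetD t (i - 1) 0 = 0 then
        PySem.List.pySetD t (i - 1) 1
      else t) s

def propagar (lista : List Int) : List Int :=
  (PySem.List.pyRange 0 (lista.length : Int) 1).foldl
    (fun s i =>
      let f := PySem.List.pyGetD s i 0
      let s1 := if f = 1 ∧ i < (lista.length : Int) - 1 ∧ PySem.List.pyGetD s (i + 1) 0 = 0 then
          PySem.List.pySetD s (i + 1) 1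
        else s
      propagarInner s1) lista

-- ===== PORT B =====
def propagar_alt (lista : List Int) : List Int :=
  let n : Int := (lista.length : Int)
  -- forward carry pass: a 1 fills the 0s directly to its right
  let fwd := (PySem.List.pyRange 0 n 1).foldl
    (fun (p : List Int × Bool) j =>
      let x := PySem.List.pyGetD p.1 j 0
      if x = 1 then (p.1, true)
      else if x = 0 then (if p.2 then (PySem.List.pySetD p.1 j 1, p.2) else p)
      else (p.1, false)) (lista, false)
  -- backward carry pass, twice around (index -1 wraps): a 1 fills the 0s to its left
  let bwd := (PySem.List.pyRange (2 * n - 1) (-1) (-1)).foldl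
    (fun (p : List Int × Bool) j =>
      let x := PySem.List.pyGetD p.1 (PySem.Int.mod j n) 0
      if x = 1 then (p.1, true)
      else if x = 0 then (if p.2 then (PySem.List.pySetD p.1 (PySem.Int.mod j n) 1, p.2) else p)
      else (p.1, false)) (fwd.1, false)
  bwd.1

-- ===== PRECONDITION & SPEC =====
def Spec_propagar (lista : List Int) (out : List Int) : Prop := out = propagar_alt lista
instance (lista : List Int) (out : List Int) : Decidable (Spec_propagar lista out) := by unfold Spec_propagar; infer_instance

-- ===== CLAIM (what is proved, stated in full; the proofs are below) =====
def Claim_equal_propagar : Prop := ∀ (lista : List Int), Dom_propagar lista → Spec_propagar lista (propagar lista)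

-- ===== LEMMAS AND PROOFS =====

-- cell value: Python lista[k] for 0 ≤ k < len (0 outside the list, which the lemmas guard)
def gv (s : List Int) (k : Nat) : Int := s.getD k 0
-- circular predecessor: Python index k-1, where -1 means the last cell
def pr (n k : Nat) : Nat := if k = 0 then n - 1 else k - 1

-- a rightward fill is enabled at p (A's outer-loop assignment / B's forward pass)
def rApp (s : List Int) (p : Nat) : Prop := p + 1 < s.length ∧ gv s p = 1 ∧ gv s (p + 1) = 0
-- a leftward fill is enabled at k (A's inner sweep / B's backward pass), circular at k = 0
def lApp (s : List Int) (k : Nat) : Prop := k < s.length ∧ gv s k = 1 ∧ gv s (pr s.length k) = 0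

-- states reachable from l by valid fills
inductive Steps (l : List Int) : List Int → Prop
  | refl : Steps l l
  | fillR {s : List Int} {p : Nat} : Steps l s → rApp s p → Steps l (s.set (p + 1) 1)
  | fillL {s : List Int} {k : Nat} : Steps l s → lApp s k → Steps l (s.set (pr s.length k) 1)

def Rsat (s : List Int) : Prop := ∀ p, ¬ rApp s p
def Lsat (s : List Int) : Prop := ∀ k, ¬ lApp s k
-- t is s with some 0-cells turned into 1s
def LeS (s t : List Int) : Prop :=
  s.length = t.length ∧ ∀ k, k < s.length → gv s k = gv t k ∨ (gv s k = 0 ∧ gv t k = 1)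
-- the adjacent pair (j+1, j) needs no leftward fill
def NP (s : List Int) (j : Nat) : Prop := ¬ (gv s (j + 1) = 1 ∧ gv s j = 0)

-- count of zeros, the progress measure for A's sweeps
def zc (s : List Int) : Nat := s.count 0

-- clean (Nat-indexed) forms of the two programs
def lstep (n : Nat) (t : List Int) (k : Nat) : List Int :=
  if gv t k = 1 ∧ gv t (pr n k) = 0 then t.set (pr n k) 1 else t
def sweepA (n : Nat) (s : List Int) : List Int := (List.range n).foldl (lstep n) s
def rstepA (n : Nat) (s : List Int) (i : Nat) : List Int :=
  if gv s i = 1 ∧ i + 1 < n ∧ gv s (i + 1) = 0 then s.set (i + 1) 1 else s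
def bodyA (n : Nat) (s : List Int) (i : Nat) : List Int := sweepA n (rstepA n s i)
def runA (n : Nat) : Nat → List Int → List Int
  | 0, s => s
  | m + 1, s => bodyA n (runA n m s) m
def cleanA (l : List Int) : List Int := runA l.length l.length l

def cstep (s : List Int) (c : Bool) (k : Nat) : List Int × Bool :=
  let x := gv s k
  if x = 1 then (s, true)
  else if x = 0 then (if c then (s.set k 1, c) else (s, c))
  else (s, false)
def sweepUp : Nat → List Int → Bool → List Int × Bool
  | 0, s, c => (s, c)
  | m + 1, s, c => let q := sweepUp m s c; cstep q.1 q.2 m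
def sweepDown : Nat → List Int → Bool → List Int × Bool
  | 0, s, c => (s, c)
  | m + 1, s, c => let q := cstep s c m; sweepDown m q.1 q.2
def cleanB (l : List Int) : List Int :=
  let n := l.length
  let f := sweepUp n l false
  let d1 := sweepDown n f.1 false
  let d2 := sweepDown n d1.1 d1.2
  d2.1

-- ---- basic cell lemmas ----
theorem gv_out {s : List Int} {k : Nat} (h : s.length ≤ k) : gv s k = 0 :=
  List.getD_eq_default _ _ h

theorem gv_lt {s : List Int} {k : Nat} (h : gv s k ≠ 0) : k < s.length := by
  by_contra hk; exact h (gv_out (by omega))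

theorem gv_set_self {s : List Int} {k : Nat} {v : Int} (h : k < s.length) :
    gv (s.set k v) k = v := by
  unfold gv
  rw [List.getD_eq_getElem _ _ (by simpa using h)]
  exact List.getElem_set_self _

theorem gv_set_ne {s : List Int} {k m : Nat} {v : Int} (h : m ≠ k) :
    gv (s.set k v) m = gv s m := by
  unfold gv
  by_cases hm : m < s.length
  · rw [List.getD_eq_getElem _ _ (by simpa using hm), List.getD_eq_getElem _ _ hm]
    exact List.getElem_set_ne (Ne.symm h) _
  · rw [List.getD_eq_default _ _ (by simp; omega), List.getD_eq_default _ _ (by omega)]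

theorem ext_gv {s t : List Int} (hl : s.length = t.length)
    (h : ∀ k, k < s.length → gv s k = gv t k) : s = t := by
  apply List.ext_getElem hl
  intro k hk hk'
  have := h k hk
  rwa [gv, gv, List.getD_eq_getElem _ _ hk, List.getD_eq_getElem _ _ hk'] at this

theorem pr_lt {n k : Nat} (hn : 0 < n) (hk : k ≤ n) : pr n k < n := by
  unfold pr; split <;> omega

-- ---- zero-count lemmas ----
theorem zc_set_le : ∀ (s : List Int) (k : Nat), zc (s.set k 1) ≤ zc s := by
  intro s
  induction s with
  | nil => intro k; simp [zc]
  | cons a s ih =>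
    intro k
    cases k with
    | zero => simp only [zc, List.set_cons_zero, List.count_cons]; split <;> split <;> simp_all
    | succ k =>
      simp only [zc, List.set_cons_succ, List.count_cons]
      have := ih k; unfold zc at this; omega

theorem zc_set_lt : ∀ (s : List Int) (k : Nat), k < s.length → gv s k = 0 →
    zc (s.set k 1) < zc s := by
  intro s
  induction s with
  | nil => intro k h; simp at h
  | cons a s ih =>
    intro k hk h0
    cases k with
    | zero =>
      have ha : a = 0 := by simpa [gv] using h0
      simp [zc, ha, List.count_cons]
    | succ k =>
      have hk' : k < s.length := by simpa using hk
      have h0' : gv s k = 0 := by simpa [gv] using h0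
      have := ih k hk' h0'
      simp only [zc, List.set_cons_succ, List.count_cons]
      unfold zc at this
      split <;> omega

-- ---- LeS lemmas ----
theorem les_refl (s : List Int) : LeS s s := ⟨rfl, fun _ _ => Or.inl rfl⟩

theorem les_set {u s : List Int} {m : Nat} (h : LeS u s) (hm : m < s.length)
    (h0 : gv s m = 0) : LeS u (s.set m 1) := by
  obtain ⟨hl, hp⟩ := h
  refine ⟨by simpa using hl, fun k hk => ?_⟩
  by_cases hkm : k = m
  · subst hkm
    rcases hp k hk with h | h
    · exact Or.inr ⟨h.trans h0, gv_set_self hm⟩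
    · exact Or.inr ⟨h.1, gv_set_self hm⟩
  · rw [gv_set_ne hkm]; exact hp k hk

theorem les_one {u s : List Int} {k : Nat} (h : LeS u s) (h1 : gv u k = 1)
    (hk : k < u.length) : gv s k = 1 := by
  rcases h.2 k hk with h' | h' <;> omega

theorem les_antisymm {s t : List Int} (h1 : LeS s t) (h2 : LeS t s) : s = t := by
  apply ext_gv h1.1
  intro k hk
  have hlen := h1.1
  rcases h1.2 k hk with h | h
  · exact h
  · rcases h2.2 k (by omega) with h' | h' <;> omega

-- ---- Steps lemmas ----
theorem les_of_steps {l s : List Int} (h : Steps l s) : LeS l s := by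
  induction h with
  | refl => exact les_refl l
  | fillR _ ha ih => exact les_set ih (by have := ha.1; omega) ha.2.2
  | @fillL t k _ ha ih =>
    obtain ⟨ha1, ha2, ha3⟩ := ha
    exact les_set ih (pr_lt (by omega) (by omega)) ha3

theorem steps_le {l s t : List Int} (hs : Steps l s) (ht : Steps l t)
    (hr : Rsat t) (hl : Lsat t) : LeS s t := by
  induction hs with
  | refl => exact les_of_steps ht
  | @fillR s' p _ ha ih =>
    obtain ⟨ha1, ha2, ha3⟩ := ha
    have hlen : s'.length = t.length := ih.1
    have h1t : gv t p = 1 := les_one ih ha2 (by omega)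
    have h0t : gv t (p + 1) = 1 := by
      rcases ih.2 (p + 1) ha1 with h | h
      · exfalso
        refine hr p ⟨by omega, h1t, by omega⟩
      · exact h.2
    refine ⟨by simpa using hlen, fun k hk => ?_⟩
    by_cases hkp : k = p + 1
    · subst hkp; rw [gv_set_self (by simpa using hk)]; exact Or.inl h0t.symm
    · rw [gv_set_ne hkp]; exact ih.2 k (by simpa using hk)
  | @fillL s' k _ ha ih =>
    obtain ⟨ha1, ha2, ha3⟩ := ha
    have hlen : s'.length = t.length := ih.1
    have h1t : gv t k = 1 := les_one ih ha2 (by omega)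
    have hq : pr s'.length k < s'.length := pr_lt (by omega) (by omega)
    have h0t : gv t (pr s'.length k) = 1 := by
      rcases ih.2 (pr s'.length k) hq with h | h
      · exfalso
        refine hl k ⟨by omega, h1t, ?_⟩
        rw [← hlen]; omega
      · exact h.2
    refine ⟨by simpa using hlen, fun m hm => ?_⟩
    by_cases hmq : m = pr s'.length k
    · subst hmq; rw [gv_set_self (by simpa using hm)]; exact Or.inl h0t.symm
    · rw [gv_set_ne hmq]; exact ih.2 m (by simpa using hm)

theorem steps_unique {l s t : List Int} (hs : Steps l s) (ht : Steps l t)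
    (hrs : Rsat s) (hls : Lsat s) (hrt : Rsat t) (hlt : Lsat t) : s = t :=
  les_antisymm (steps_le hs ht hrt hlt) (steps_le ht hs hrs hls)

-- ---- a leftward fill never enables a rightward fill (shared by A's sweep and B's backward pass) ----
theorem rApp_pres_fillL {s : List Int} {k p : Nat} (hk : k < s.length)
    (h1 : gv s k = 1) (h0 : gv s (pr s.length k) = 0) (hp : ¬ rApp s p) :
    ¬ rApp (s.set (pr s.length k) 1) p := by
  intro hra
  obtain ⟨hlen, hp1, hp0⟩ := hra
  have hqlt : pr s.length k < s.length := pr_lt (by omega) (by omega)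
  have hne : p + 1 ≠ pr s.length k := by
    intro h; rw [h, gv_set_self hqlt] at hp0; omega
  rw [gv_set_ne hne] at hp0
  by_cases hpq : p = pr s.length k
  · by_cases hk0 : k = 0
    · exfalso
      subst hk0
      have : pr s.length 0 = s.length - 1 := by unfold pr; simp
      simp only [List.length_set] at hlen
      omega
    · have hplus : p + 1 = k := by
        unfold pr at hpq; rw [if_neg hk0] at hpq; omega
      rw [hplus] at hp0; omega
  · rw [gv_set_ne hpq] at hp1
    exact hp ⟨by simpa using hlen, hp1, hp0⟩

-- ---- A-side: lstep / sweepA ----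
theorem length_lstep {n : Nat} {t : List Int} {k : Nat} : (lstep n t k).length = t.length := by
  unfold lstep; split <;> simp

theorem lstep_cases (n : Nat) (t : List Int) (k : Nat) (ht : t.length = n) :
    lstep n t k = t ∨
      (gv t k = 1 ∧ gv t (pr n k) = 0 ∧ pr n k < t.length ∧
        lstep n t k = t.set (pr n k) 1) := by
  unfold lstep
  split
  · rename_i h
    have hkl : k < t.length := gv_lt (by rw [h.1]; omega)
    refine Or.inr ⟨h.1, h.2, ?_, rfl⟩
    rw [ht]; exact pr_lt (by omega) (by omega)
  · exact Or.inl rfl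

theorem zc_lstep_le {n : Nat} {t : List Int} {k : Nat} : zc (lstep n t k) ≤ zc t := by
  unfold lstep; split
  · exact zc_set_le t _
  · exact le_refl _

theorem zc_foldl_lstep_le (n : Nat) : ∀ (ks : List Nat) (s : List Int),
    zc (ks.foldl (lstep n) s) ≤ zc s := by
  intro ks
  induction ks with
  | nil => intro s; exact le_refl _
  | cons k ks ih => intro s; exact le_trans (ih (lstep n s k)) zc_lstep_le

theorem length_foldl_lstep (n : Nat) : ∀ (ks : List Nat) (s : List Int),
    (ks.foldl (lstep n) s).length = s.length := by
  intro ks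
  induction ks with
  | nil => intro s; rfl
  | cons k ks ih => intro s; rw [List.foldl_cons, ih, length_lstep]

theorem length_sweepA {n : Nat} {s : List Int} : (sweepA n s).length = s.length :=
  length_foldl_lstep n _ s

theorem steps_lstep {l : List Int} {n : Nat} {t : List Int} {k : Nat}
    (ht : t.length = n) (hs : Steps l t) : Steps l (lstep n t k) := by
  rcases lstep_cases n t k ht with h | ⟨h1, h0, hq, heq⟩
  · rwa [h]
  · rw [heq, show t.set (pr n k) 1 = t.set (pr t.length k) 1 by rw [ht]]
    refine Steps.fillL hs ⟨gv_lt (by rw [h1]; omega), h1, ?_⟩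
    rw [ht]; exact h0

theorem steps_foldl_lstep {l : List Int} (n : Nat) : ∀ (ks : List Nat) (s : List Int),
    s.length = n → Steps l s → Steps l (ks.foldl (lstep n) s) := by
  intro ks
  induction ks with
  | nil => intro s _ hs; exact hs
  | cons k ks ih =>
    intro s hl hs
    exact ih _ (by rw [length_lstep, hl]) (steps_lstep hl hs)

theorem rApp_pres_lstep {n : Nat} {t : List Int} {k p : Nat} (ht : t.length = n)
    (hp : ¬ rApp t p) : ¬ rApp (lstep n t k) p := by
  rcases lstep_cases n t k ht with h | ⟨h1, h0, hq, heq⟩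
  · rwa [h]
  · rw [heq, show t.set (pr n k) 1 = t.set (pr t.length k) 1 by rw [ht]]
    refine rApp_pres_fillL (gv_lt (by rw [h1]; omega)) h1 ?_ hp
    rw [ht]; exact h0

theorem rApp_pres_foldl_lstep (n : Nat) : ∀ (ks : List Nat) (s : List Int) (p : Nat),
    s.length = n → ¬ rApp s p → ¬ rApp (ks.foldl (lstep n) s) p := by
  intro ks
  induction ks with
  | nil => intro s p _ hp; exact hp
  | cons k ks ih =>
    intro s p hl hp
    exact ih _ p (by rw [length_lstep, hl]) (rApp_pres_lstep hl hp)

theorem foldl_lstep_id_of_lsat {n : Nat} : ∀ (ks : List Nat) (s : List Int),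
    s.length = n → Lsat s → ks.foldl (lstep n) s = s := by
  intro ks
  induction ks with
  | nil => intro s _ _; rfl
  | cons k ks ih =>
    intro s hl hs
    have hid : lstep n s k = s := by
      unfold lstep; split
      · rename_i h
        exfalso
        refine hs k ⟨gv_lt (by rw [h.1]; omega), h.1, ?_⟩
        rw [hl]; exact h.2
      · rfl
    rw [List.foldl_cons, hid]
    exact ih s hl hs

theorem sweep_progress (n : Nat) : ∀ (ks : List Nat) (s : List Int),
    s.length = n → (∃ k ∈ ks, lApp s k) → zc (ks.foldl (lstep n) s) < zc s := by
  intro ks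
  induction ks with
  | nil =>
    intro s _ h
    obtain ⟨k, hk, _⟩ := h
    simp at hk
  | cons k0 ks ih =>
    intro s hl hex
    obtain ⟨k, hk, ha⟩ := hex
    by_cases hid : lstep n s k0 = s
    · rw [List.foldl_cons, hid]
      rcases List.mem_cons.mp hk with rfl | hk'
      · exfalso
        have hfires : gv s k = 1 ∧ gv s (pr n k) = 0 := by
          refine ⟨ha.2.1, ?_⟩
          rw [← hl]; exact ha.2.2
        have heq : lstep n s k = s.set (pr n k) 1 := by unfold lstep; rw [if_pos hfires]
        have hq : pr n k < s.length := by
          rw [hl]; exact pr_lt (by have := ha.1; omega) (by have := ha.1; have := ha.2.1; omega)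
        rw [heq] at hid
        have hone : gv (s.set (pr n k) 1) (pr n k) = 1 := gv_set_self hq
        rw [hid] at hone
        have := hfires.2
        omega
      · exact ih s hl ⟨k, hk', ha⟩
    · rcases lstep_cases n s k0 hl with h | ⟨h1, h0, hq, heq⟩
      · exact absurd h hid
      · rw [List.foldl_cons]
        calc zc (ks.foldl (lstep n) (lstep n s k0)) ≤ zc (lstep n s k0) :=
              zc_foldl_lstep_le n ks _
          _ < zc s := by rw [heq]; exact zc_set_lt s _ hq h0

theorem lsat_rstepA {n : Nat} {s : List Int} {i : Nat} (hl : s.length = n)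
    (hs : Lsat s) : Lsat (rstepA n s i) := by
  unfold rstepA
  split
  · rename_i h
    obtain ⟨h1, hi, h0⟩ := h
    intro k hka
    obtain ⟨hk, hk1, hk0⟩ := hka
    simp only [List.length_set] at hk hk0
    have hi1 : i + 1 < s.length := by omega
    by_cases hkq : k = i + 1
    · subst hkq
      have hpr : pr s.length (i + 1) = i := by unfold pr; simp
      rw [hpr, gv_set_ne (by omega : i ≠ i + 1)] at hk0
      omega
    · have hprq : pr s.length k ≠ i + 1 := by
        intro hcon
        rw [hcon, gv_set_self hi1] at hk0; omega
      rw [gv_set_ne hkq] at hk1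
      rw [gv_set_ne hprq] at hk0
      exact hs k ⟨hk, hk1, hk0⟩
  · exact hs

theorem length_rstepA {n : Nat} {s : List Int} {i : Nat} : (rstepA n s i).length = s.length := by
  unfold rstepA; split <;> simp

theorem steps_rstepA {l : List Int} {n : Nat} {s : List Int} {i : Nat}
    (hl : s.length = n) (hs : Steps l s) : Steps l (rstepA n s i) := by
  unfold rstepA
  split
  · rename_i h
    exact Steps.fillR hs ⟨by omega, h.1, h.2.2⟩
  · exact hs

theorem zc_rstepA_le {n : Nat} {s : List Int} {i : Nat} : zc (rstepA n s i) ≤ zc s := by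
  unfold rstepA; split
  · exact zc_set_le s _
  · exact le_refl _

theorem rstepA_rApp_below {n : Nat} {s : List Int} {i p : Nat} (hp : p < i)
    (h : ¬ rApp s p) : ¬ rApp (rstepA n s i) p := by
  unfold rstepA
  split
  · intro hra
    obtain ⟨hlen, h1, h0⟩ := hra
    simp only [List.length_set] at hlen
    rw [gv_set_ne (by omega : p ≠ i + 1)] at h1
    rw [gv_set_ne (by omega : p + 1 ≠ i + 1)] at h0
    exact h ⟨hlen, h1, h0⟩
  · exact h

theorem rstepA_rApp_self {n : Nat} {s : List Int} {i : Nat} (hl : s.length = n) :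
    ¬ rApp (rstepA n s i) i := by
  unfold rstepA
  split
  · rename_i hg
    intro hra
    obtain ⟨hlen, h1, h0⟩ := hra
    simp only [List.length_set] at hlen
    rw [gv_set_self (by omega)] at h0
    omega
  · rename_i hg
    intro hra
    obtain ⟨hlen, h1, h0⟩ := hra
    exact hg ⟨h1, by omega, h0⟩

-- the A-side loop with its invariants: reachable, and no rightward fill enabled below the cursor
theorem runA_inv (l : List Int) (n : Nat) (hn : l.length = n) : ∀ (m : Nat), m ≤ n →
    (runA n m l).length = n ∧ Steps l (runA n m l) ∧
      ∀ p, p < m → ¬ rApp (runA n m l) p := by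
  intro m
  induction m with
  | zero => intro _; exact ⟨hn, Steps.refl, fun p hp => by omega⟩
  | succ m ih =>
    intro hm
    obtain ⟨hlen, hst, hr⟩ := ih (by omega)
    rw [show runA n (m + 1) l = bodyA n (runA n m l) m from rfl]
    set t := runA n m l with ht
    have h1len : (rstepA n t m).length = n := by rw [length_rstepA, hlen]
    have hblen : (bodyA n t m).length = n := by unfold bodyA; rw [length_sweepA, h1len]
    refine ⟨hblen, ?_, ?_⟩
    · unfold bodyA sweepA
      exact steps_foldl_lstep n _ _ h1len (steps_rstepA hlen hst)
    · intro p hp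
      have hstep : ¬ rApp (rstepA n t m) p := by
        by_cases hpm : p < m
        · exact rstepA_rApp_below hpm (hr p hpm)
        · have hpe : p = m := by omega
          subst hpe
          exact rstepA_rApp_self hlen
      unfold bodyA sweepA
      exact rApp_pres_foldl_lstep n _ _ p h1len hstep

theorem lsat_bodyA {n : Nat} {s : List Int} {i : Nat} (hl : s.length = n)
    (hs : Lsat s) : Lsat (bodyA n s i) := by
  unfold bodyA sweepA
  have h1 : Lsat (rstepA n s i) := lsat_rstepA hl hs
  rw [foldl_lstep_id_of_lsat _ _ (by rw [length_rstepA, hl]) h1]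
  exact h1

theorem lsat_runA (l : List Int) (n : Nat) (hn : l.length = n) (hs : Lsat l) :
    ∀ m, m ≤ n → Lsat (runA n m l) := by
  intro m
  induction m with
  | zero => intro _; exact hs
  | succ m ih =>
    intro hm
    have hlen := (runA_inv l n hn m (by omega)).1
    exact lsat_bodyA hlen (ih (by omega))

-- each outer iteration of A either reaches a left-saturated state or kills a zero
theorem runA_lz (l : List Int) (n : Nat) (hn : l.length = n) : ∀ (m : Nat), m ≤ n →
    Lsat (runA n m l) ∨ zc (runA n m l) + m ≤ zc l := by
  intro m
  induction m with
  | zero => intro _; exact Or.inr (by simp [runA])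
  | succ m ih =>
    intro hm
    obtain ⟨hlen, _, _⟩ := runA_inv l n hn m (by omega)
    set t := runA n m l with ht
    have hrun : runA n (m + 1) l = bodyA n t m := rfl
    rcases ih (by omega) with hls | hz
    · left; rw [hrun]; exact lsat_bodyA hlen hls
    · by_cases hfin : Lsat (runA n (m + 1) l)
      · exact Or.inl hfin
      · right
        rw [hrun] at hfin ⊢
        have h1len : (rstepA n t m).length = n := by rw [length_rstepA, hlen]
        have hlt : zc (bodyA n t m) < zc t := by
          by_cases hls1 : Lsat (rstepA n t m)
          · exfalso
            apply hfin
            unfold bodyA sweepA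
            rw [foldl_lstep_id_of_lsat _ _ h1len hls1]
            exact hls1
          · have hex : ∃ k, lApp (rstepA n t m) k := by
              by_contra hno
              push_neg at hno
              exact hls1 (fun k => hno k)
            obtain ⟨k, hk⟩ := hex
            have hmem : k ∈ List.range n := by
              rw [List.mem_range]
              have := hk.1; omega
            calc zc (bodyA n t m) < zc (rstepA n t m) := by
                  unfold bodyA sweepA
                  exact sweep_progress n _ _ h1len ⟨k, hmem, hk⟩
              _ ≤ zc t := zc_rstepA_le
        omega

theorem all_zero_lsat {l : List Int} (h : zc l = l.length) : Lsat l := by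
  intro k hka
  obtain ⟨hk, h1, _⟩ := hka
  have hall : ∀ b ∈ l, (0 : Int) = b := List.count_eq_length.mp h
  have hm : gv l k ∈ l := by
    unfold gv
    rw [List.getD_eq_getElem _ _ hk]
    exact List.getElem_mem hk
  have := hall _ hm
  omega

theorem cleanA_sat (l : List Int) :
    Steps l (cleanA l) ∧ Rsat (cleanA l) ∧ Lsat (cleanA l) := by
  obtain ⟨hlen, hst, hr⟩ := runA_inv l l.length rfl l.length (le_refl _)
  have hrsat : Rsat (runA l.length l.length l) := by
    intro p hp
    have := hp.1
    rw [hlen] at this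
    exact hr p (by omega) hp
  have hlsat : Lsat (runA l.length l.length l) := by
    rcases runA_lz l l.length rfl l.length (le_refl _) with h | h
    · exact h
    · have hzl : zc l ≤ l.length := List.count_le_length
      exact lsat_runA l l.length rfl (all_zero_lsat (by omega)) l.length (le_refl _)
  exact ⟨hst, hrsat, hlsat⟩

-- ---- B-side: cstep / sweepUp / sweepDown ----
theorem cstep_cases (s : List Int) (c : Bool) (k : Nat) :
    ((cstep s c k).1 = s ∧ (cstep s c k).2 = true ∧ gv s k = 1) ∨
    ((cstep s c k).1 = s.set k 1 ∧ (cstep s c k).2 = true ∧ gv s k = 0 ∧ c = true) ∨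
    ((cstep s c k).1 = s ∧ (cstep s c k).2 = false ∧ gv s k = 0 ∧ c = false) ∨
    ((cstep s c k).1 = s ∧ (cstep s c k).2 = false ∧ gv s k ≠ 1 ∧ gv s k ≠ 0) := by
  unfold cstep
  by_cases h1 : gv s k = 1
  · simp [h1]
  · by_cases h0 : gv s k = 0
    · cases c
      · simp [h1, h0]
      · simp [h1, h0]
    · simp [h1, h0]

-- forward pass: carry is exact, all fills valid, no rightward fill left enabled behind the cursor
theorem sweepUp_inv (l : List Int) (n : Nat) (hn : l.length = n) : ∀ m, m ≤ n →
    (sweepUp m l false).1.length = n ∧ Steps l (sweepUp m l false).1 ∧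
      ((sweepUp m l false).2 = decide (0 < m ∧ gv (sweepUp m l false).1 (m - 1) = 1)) ∧
      ∀ p, p + 1 < m → ¬ rApp (sweepUp m l false).1 p := by
  intro m
  induction m with
  | zero =>
    intro _
    refine ⟨hn, Steps.refl, by simp [sweepUp], fun p hp => by omega⟩
  | succ m ih =>
    intro hm
    obtain ⟨hlen, hst, hc, hr⟩ := ih (by omega)
    set q := sweepUp m l false with hq
    have hstep : sweepUp (m + 1) l false = cstep q.1 q.2 m := rfl
    rw [hstep]
    rcases cstep_cases q.1 q.2 m with ⟨he1, he2, h1⟩ | ⟨he1, he2, h0, hctrue⟩ |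
      ⟨he1, he2, h0, hcfalse⟩ | ⟨he1, he2, hn1, hn0⟩
    · rw [he1, he2]
      refine ⟨hlen, hst, by simp [h1], ?_⟩
      intro p hp
      by_cases hpm : p + 1 < m
      · exact hr p hpm
      · have hpe : p + 1 = m := by omega
        intro hra
        obtain ⟨_, _, hc0⟩ := hra
        rw [hpe] at hc0; omega
    · -- carry fill at cell m
      have hcm : 0 < m ∧ gv q.1 (m - 1) = 1 := by
        rw [hctrue] at hc
        simpa using hc.symm
      have hmn : m < n := by omega
      have hra : rApp q.1 (m - 1) := by
        refine ⟨by omega, hcm.2, ?_⟩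
        rw [show m - 1 + 1 = m by omega]
        exact h0
      rw [he1, he2]
      refine ⟨by simpa using hlen, ?_, ?_, ?_⟩
      · rw [show q.1.set m 1 = q.1.set (m - 1 + 1) 1 by rw [show m - 1 + 1 = m by omega]]
        exact Steps.fillR hst hra
      · have hgm : gv (q.1.set m 1) m = 1 := gv_set_self (by omega)
        simp [hgm]
      · intro p hp
        intro hra'
        obtain ⟨hplen, hp1, hp0⟩ := hra'
        simp only [List.length_set] at hplen
        by_cases hpm : p + 1 < m
        · rw [gv_set_ne (by omega : p ≠ m)] at hp1
          rw [gv_set_ne (by omega : p + 1 ≠ m)] at hp0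
          exact hr p hpm ⟨hplen, hp1, hp0⟩
        · have hpe : p + 1 = m := by omega
          rw [hpe, gv_set_self (by omega)] at hp0
          omega
    · rw [he1, he2]
      refine ⟨hlen, hst, by simp [h0], ?_⟩
      intro p hp
      by_cases hpm : p + 1 < m
      · exact hr p hpm
      · have hpe : p + 1 = m := by omega
        intro hra
        obtain ⟨_, hp1, hp0⟩ := hra
        have hm0 : 0 < m := by omega
        have hgm1 : gv q.1 (m - 1) = 1 := by
          rw [show m - 1 = p by omega]
          exact hp1
        rw [hc] at hcfalse
        simp [hm0, hgm1] at hcfalse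
    · rw [he1, he2]
      refine ⟨hlen, hst, by simp [hn1], ?_⟩
      intro p hp
      by_cases hpm : p + 1 < m
      · exact hr p hpm
      · have hpe : p + 1 = m := by omega
        intro hra
        obtain ⟨_, _, hp0⟩ := hra
        rw [hpe] at hp0
        exact hn0 hp0

-- first backward pass: all fills valid, rightward saturation kept, carry exact at the end,
-- and no adjacent pair (j+1, j) is left needing a leftward fill
theorem sweepDown_first (l : List Int) (n : Nat) : ∀ (m : Nat) (s : List Int) (c : Bool),
    m ≤ n → s.length = n → Steps l s → Rsat s →
    (c = true → gv s (m % n) = 1) →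
    (m < n → c = decide (gv s m = 1)) →
    (∀ j, m ≤ j → j + 1 < n → NP s j) →
    (sweepDown m s c).1.length = n ∧ Steps l (sweepDown m s c).1 ∧
      Rsat (sweepDown m s c).1 ∧
      (0 < n → (sweepDown m s c).2 = decide (gv (sweepDown m s c).1 0 = 1)) ∧
      (∀ j, j + 1 < n → NP (sweepDown m s c).1 j) := by
  intro m
  induction m with
  | zero =>
    intro s c _ hlen hst hrs hci hiff hnp
    exact ⟨hlen, hst, hrs, fun hn => hiff hn, fun j hj => hnp j (by omega) hj⟩
  | succ m ih =>
    intro s c hm hlen hst hrs hci hiff hnp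
    have hmn : m < n := by omega
    have hstep : sweepDown (m + 1) s c = sweepDown m (cstep s c m).1 (cstep s c m).2 := rfl
    have key : (cstep s c m).1.length = n ∧ Steps l (cstep s c m).1 ∧
        Rsat (cstep s c m).1 ∧
        ((cstep s c m).2 = true → gv (cstep s c m).1 (m % n) = 1) ∧
        (m < n → (cstep s c m).2 = decide (gv (cstep s c m).1 m = 1)) ∧
        (∀ j, m ≤ j → j + 1 < n → NP (cstep s c m).1 j) := by
      rcases cstep_cases s c m with ⟨he1, he2, h1⟩ | ⟨he1, he2, h0, hctrue⟩ |
        ⟨he1, he2, h0, hcfalse⟩ | ⟨he1, he2, hn1, hn0⟩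
      · rw [he1, he2]
        refine ⟨hlen, hst, hrs, ?_, by simp [h1], ?_⟩
        · intro _
          rw [Nat.mod_eq_of_lt hmn]
          exact h1
        · intro j hjm hj
          rcases Nat.eq_or_lt_of_le hjm with hje | hlt
          · intro hpair
            obtain ⟨_, hj0⟩ := hpair
            rw [← hje] at hj0
            omega
          · exact hnp j hlt hj
      · -- carry fill at cell m: a leftward fill from cell (m+1) % n
        have hgk : gv s ((m + 1) % n) = 1 := hci hctrue
        have hpr : pr s.length ((m + 1) % n) = m := by
          rw [hlen]
          by_cases hmn1 : m + 1 = n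
          · rw [hmn1, Nat.mod_self]
            unfold pr; simp; omega
          · rw [Nat.mod_eq_of_lt (by omega)]
            unfold pr; simp
        have hkl : (m + 1) % n < s.length := by
          rw [hlen]; exact Nat.mod_lt _ (by omega)
        have hfill : Steps l (s.set m 1) := by
          have := Steps.fillL hst ⟨hkl, hgk, by rw [hpr]; exact h0⟩
          rwa [hpr] at this
        rw [he1, he2]
        refine ⟨by simpa using hlen, hfill, ?_, ?_, ?_, ?_⟩
        · intro p
          have := rApp_pres_fillL (k := (m + 1) % n) (p := p) hkl hgk
            (by rw [hpr]; exact h0) (hrs p)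
          rwa [hpr] at this
        · intro _
          rw [Nat.mod_eq_of_lt hmn]
          exact gv_set_self (by omega)
        · intro _
          have hgm : gv (s.set m 1) m = 1 := gv_set_self (by omega)
          simp [hgm]
        · intro j hjm hj
          rcases Nat.eq_or_lt_of_le hjm with hje | hlt
          · intro hpair
            obtain ⟨_, hj0⟩ := hpair
            rw [← hje, gv_set_self (by omega)] at hj0
            omega
          · intro hpair
            obtain ⟨hj1, hj0⟩ := hpair
            rw [gv_set_ne (by omega : j + 1 ≠ m)] at hj1
            rw [gv_set_ne (by omega : j ≠ m)] at hj0
            exact hnp j hlt hj ⟨hj1, hj0⟩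
      · rw [he1, he2]
        refine ⟨hlen, hst, hrs, by simp, by simp [h0], ?_⟩
        intro j hjm hj
        rcases Nat.eq_or_lt_of_le hjm with hje | hlt
        · intro hpair
          obtain ⟨hj1, _⟩ := hpair
          rw [← hje] at hj1
          have hc' := hiff (by omega)
          rw [hcfalse, hj1] at hc'
          simp at hc'
        · exact hnp j hlt hj
      · rw [he1, he2]
        refine ⟨hlen, hst, hrs, by simp, by simp [hn1], ?_⟩
        intro j hjm hj
        rcases Nat.eq_or_lt_of_le hjm with hje | hlt
        · intro hpair
          rw [hje] at hn0
          exact hn0 hpair.2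
        · exact hnp j hlt hj
    obtain ⟨klen, kst, krs, kci, kiff, knp⟩ := key
    rw [hstep]
    exact ih (cstep s c m).1 (cstep s c m).2 (by omega) klen kst krs
      kci (fun _ => kiff hmn) knp

-- second backward pass: starting from the first pass's outcome u (no pair needs a leftward fill,
-- exact carry), it finishes the circular propagation through the lista[-1] wrap and leaves the
-- state fully left-saturated
theorem sweepDown_second (l u : List Int) (n : Nat)
    (hu : u.length = n) (hq : ∀ j, j + 1 < n → NP u j) :
    ∀ (m : Nat) (s : List Int) (c : Bool),
    m ≤ n → s.length = n → Steps l s → Rsat s → LeS u s →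
    (c = decide (gv s (m % n) = 1)) →
    (∀ j, m ≤ j → j + 1 < n → NP s j) →
    (gv u 0 = 0 → s = u) →
    (gv u 0 = 1 → m < n → gv s (n - 1) ≠ 0) →
    (sweepDown m s c).1.length = n ∧ Steps l (sweepDown m s c).1 ∧
      Rsat (sweepDown m s c).1 ∧ LeS u (sweepDown m s c).1 ∧
      (∀ j, j + 1 < n → NP (sweepDown m s c).1 j) ∧
      (gv u 0 = 0 → (sweepDown m s c).1 = u) ∧
      (gv u 0 = 1 → 0 < n → gv (sweepDown m s c).1 (n - 1) ≠ 0) := by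
  intro m
  induction m with
  | zero =>
    intro s c hm hlen hst hrs hles hciff hnp hwa hwb
    refine ⟨hlen, hst, hrs, hles, fun j hj => hnp j (by omega) hj, hwa, ?_⟩
    intro h1 hn
    exact hwb h1 hn
  | succ m ih =>
    intro s c hm hlen hst hrs hles hciff hnp hwa hwb
    have hmn : m < n := by omega
    have hstep : sweepDown (m + 1) s c = sweepDown m (cstep s c m).1 (cstep s c m).2 := rfl
    have key : (cstep s c m).1.length = n ∧ Steps l (cstep s c m).1 ∧
        Rsat (cstep s c m).1 ∧ LeS u (cstep s c m).1 ∧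
        ((cstep s c m).2 = decide (gv (cstep s c m).1 (m % n) = 1)) ∧
        (∀ j, m ≤ j → j + 1 < n → NP (cstep s c m).1 j) ∧
        (gv u 0 = 0 → (cstep s c m).1 = u) ∧
        (gv u 0 = 1 → m < n → gv (cstep s c m).1 (n - 1) ≠ 0) := by
      have hmodm : m % n = m := Nat.mod_eq_of_lt hmn
      rcases cstep_cases s c m with ⟨he1, he2, h1⟩ | ⟨he1, he2, h0, hctrue⟩ |
        ⟨he1, he2, h0, hcfalse⟩ | ⟨he1, he2, hn1, hn0⟩
      · rw [he1, he2]
        refine ⟨hlen, hst, hrs, hles, by rw [hmodm]; simp [h1], ?_, hwa, ?_⟩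
        · intro j hjm hj
          rcases Nat.eq_or_lt_of_le hjm with hje | hlt
          · intro hpair
            obtain ⟨_, hj0⟩ := hpair
            rw [← hje] at hj0
            omega
          · exact hnp j hlt hj
        · -- wrapB established (m + 1 = n) or preserved (m + 1 < n)
          intro h1u _
          by_cases hmn1 : m + 1 = n
          · have : n - 1 = m := by omega
            rw [this]
            omega
          · exact hwb h1u (by omega)
      · -- carry fill at cell m: a leftward fill from cell (m+1) % n
        have hgk : gv s ((m + 1) % n) = 1 := by
          rw [hciff] at hctrue
          simpa using hctrue
        have hpr : pr s.length ((m + 1) % n) = m := by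
          rw [hlen]
          by_cases hmn1 : m + 1 = n
          · rw [hmn1, Nat.mod_self]
            unfold pr; simp; omega
          · rw [Nat.mod_eq_of_lt (by omega)]
            unfold pr; simp
        have hkl : (m + 1) % n < s.length := by
          rw [hlen]; exact Nat.mod_lt _ (by omega)
        have hfill : Steps l (s.set m 1) := by
          have := Steps.fillL hst ⟨hkl, hgk, by rw [hpr]; exact h0⟩
          rwa [hpr] at this
        rw [he1, he2]
        refine ⟨by simpa using hlen, hfill, ?_, les_set hles (by omega) h0, ?_, ?_, ?_, ?_⟩
        · intro p
          have := rApp_pres_fillL (k := (m + 1) % n) (p := p) hkl hgk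
            (by rw [hpr]; exact h0) (hrs p)
          rwa [hpr] at this
        · rw [hmodm]
          have hgm : gv (s.set m 1) m = 1 := gv_set_self (by omega)
          simp [hgm]
        · intro j hjm hj
          rcases Nat.eq_or_lt_of_le hjm with hje | hlt
          · intro hpair
            obtain ⟨_, hj0⟩ := hpair
            rw [← hje, gv_set_self (by omega)] at hj0
            omega
          · intro hpair
            obtain ⟨hj1, hj0⟩ := hpair
            rw [gv_set_ne (by omega : j + 1 ≠ m)] at hj1
            rw [gv_set_ne (by omega : j ≠ m)] at hj0
            exact hnp j hlt hj ⟨hj1, hj0⟩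
        · -- the wrap-chain argument: if u's first cell is 0 nothing can fire, so a fill is absurd
          intro h0u
          exfalso
          have hsu : s = u := hwa h0u
          by_cases hmn1 : m + 1 = n
          · rw [hmn1, Nat.mod_self, hsu] at hgk
            omega
          · have hj1 : gv u (m + 1) = 1 := by
              rw [Nat.mod_eq_of_lt (by omega), hsu] at hgk
              exact hgk
            have hj0 : gv u m = 0 := by rw [hsu] at h0; exact h0
            exact hq m (by omega) ⟨hj1, hj0⟩
        · -- wrapB established or preserved
          intro h1u _
          by_cases hmn1 : m + 1 = n
          · have hnm : n - 1 = m := by omega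
            rw [hnm, gv_set_self (by omega)]
            omega
          · rw [gv_set_ne (by omega : n - 1 ≠ m)]
            exact hwb h1u (by omega)
      · rw [he1, he2]
        refine ⟨hlen, hst, hrs, hles, ?_, ?_, hwa, ?_⟩
        · rw [hmodm]; simp [h0]
        · intro j hjm hj
          rcases Nat.eq_or_lt_of_le hjm with hje | hlt
          · intro hpair
            obtain ⟨hj1, _⟩ := hpair
            rw [← hje] at hj1
            rw [hciff, Nat.mod_eq_of_lt (by omega), hj1] at hcfalse
            simp at hcfalse
          · exact hnp j hlt hj
        · -- wrapB: if m + 1 = n the carry is the truth of gv s 0 = 1; here it is false yet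
          -- the cell processed is n-1 and keeps its value, which is 0 only if the carry fired
          intro h1u _
          by_cases hmn1 : m + 1 = n
          · exfalso
            have hs0 : gv s 0 = 1 := les_one hles h1u (by omega)
            rw [hciff, hmn1, Nat.mod_self, hs0] at hcfalse
            simp at hcfalse
          · exact hwb h1u (by omega)
      · rw [he1, he2]
        refine ⟨hlen, hst, hrs, hles, by rw [hmodm]; simp [hn1], ?_, hwa, ?_⟩
        · intro j hjm hj
          rcases Nat.eq_or_lt_of_le hjm with hje | hlt
          · intro hpair
            rw [hje] at hn0
            exact hn0 hpair.2
          · exact hnp j hlt hj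
        · intro h1u _
          by_cases hmn1 : m + 1 = n
          · have : n - 1 = m := by omega
            rw [this]
            exact hn0
          · exact hwb h1u (by omega)
    obtain ⟨klen, kst, krs, kle, kiff, knp, kwa, kwb⟩ := key
    rw [hstep]
    exact ih (cstep s c m).1 (cstep s c m).2 (by omega) klen kst krs kle kiff knp kwa
      (fun h1u _ => kwb h1u hmn)

theorem cleanB_sat (l : List Int) :
    Steps l (cleanB l) ∧ Rsat (cleanB l) ∧ Lsat (cleanB l) := by
  by_cases hn0 : l.length = 0
  · have hl : l = [] := List.length_eq_zero_iff.mp hn0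
    subst hl
    refine ⟨Steps.refl, ?_, ?_⟩
    · intro p hp
      have := hp.1
      simp [cleanB, sweepUp, sweepDown] at this
    · intro k hk
      have := hk.1
      simp [cleanB, sweepUp, sweepDown] at this
  · have hn : 0 < l.length := by omega
    set n := l.length with hnn
    obtain ⟨flen, fst, _, frs⟩ := sweepUp_inv l n rfl n (le_refl n)
    set f := sweepUp n l false with hf
    have frsat : Rsat f.1 := by
      intro p hp
      have := hp.1
      rw [flen] at this
      exact frs p (by omega) hp
    obtain ⟨d1len, d1st, d1rs, d1ci, d1np⟩ := sweepDown_first l n n f.1 false (le_refl n)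
      flen fst frsat (by simp) (fun h => absurd h (by omega)) (fun j hj hj1 => by omega)
    set d1 := sweepDown n f.1 false with hd1
    obtain ⟨d2len, d2st, d2rs, d2le, d2np, d2wa, d2wb⟩ :=
      sweepDown_second l d1.1 n d1len d1np n d1.1 d1.2 (le_refl n) d1len d1st d1rs
        (les_refl d1.1) (by rw [Nat.mod_self]; exact d1ci hn) (fun j hj hj1 => by omega)
        (fun _ => rfl) (fun _ h => absurd h (by omega))
    set d2 := sweepDown n d1.1 d1.2 with hd2
    have hcb : cleanB l = d2.1 := rfl
    rw [hcb]
    refine ⟨d2st, d2rs, ?_⟩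
    intro k hk
    obtain ⟨hkl, hk1, hk0⟩ := hk
    rw [d2len] at hkl
    by_cases hk0' : k = 0
    · subst hk0'
      have hpr : pr d2.1.length 0 = n - 1 := by rw [d2len]; unfold pr; simp
      rw [hpr] at hk0
      by_cases hu1 : gv d1.1 0 = 1
      · exact d2wb hu1 hn hk0
      · by_cases hu0 : gv d1.1 0 = 0
        · have := d2wa hu0
          rw [this] at hk1
          omega
        · rcases d2le.2 0 (by omega) with h | h <;> omega
    · have hpr : pr d2.1.length k = k - 1 := by unfold pr; rw [if_neg hk0']
      rw [hpr] at hk0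
      exact d2np (k - 1) (by omega) ⟨by rw [show k - 1 + 1 = k by omega]; exact hk1, hk0⟩

-- ---- bridges: the PySem ports compute the clean Nat-indexed forms ----
theorem foldl_congr_inv {α β : Type} (P : α → Prop) (f g : α → β → α) :
    ∀ (ks : List β) (a : α), P a → (∀ x b, P x → b ∈ ks → f x b = g x b) →
    (∀ x b, P x → b ∈ ks → P (g x b)) → ks.foldl f a = ks.foldl g a := by
  intro ks
  induction ks with
  | nil => intros; rfl
  | cons b ks ih =>
    intro a ha hfg hP
    rw [List.foldl_cons, List.foldl_cons, hfg a b ha (List.mem_cons_self ..)]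
    exact ih _ (hP a b ha (List.mem_cons_self ..))
      (fun x b' hx hb => hfg x b' hx (List.mem_cons_of_mem _ hb))
      (fun x b' hx hb => hP x b' hx (List.mem_cons_of_mem _ hb))

theorem pyGetD_gv (t : List Int) (k : Nat) : PySem.List.pyGetD t (k : Int) 0 = gv t k := by
  rw [PySem.List.pyGetD_natCast]; rfl

theorem pyGetD_pred (t : List Int) (k : Nat) (hk : k < t.length) :
    PySem.List.pyGetD t ((k : Int) - 1) 0 = gv t (pr t.length k) := by
  cases k with
  | zero =>
    have hne : t ≠ [] := by intro h; subst h; simp at hk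
    rw [show ((0 : Nat) : Int) - 1 = -1 by ring, PySem.List.pyGetD_neg_one t 0 hne]
    rw [List.getLast_eq_getElem]
    unfold pr gv
    rw [if_pos rfl, List.getD_eq_getElem _ _ (by omega)]
  | succ k =>
    rw [show ((k + 1 : Nat) : Int) - 1 = (k : Int) by push_cast; ring, pyGetD_gv]
    unfold pr
    rw [if_neg (by omega)]
    rfl

theorem pySetD_pred (t : List Int) (k : Nat) (hk : k < t.length) :
    PySem.List.pySetD t ((k : Int) - 1) 1 = t.set (pr t.length k) 1 := by
  cases k with
  | zero =>
    rw [show ((0 : Nat) : Int) - 1 = -1 by ring]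
    unfold PySem.List.pySetD PySem.List.pySet? PySem.List.pyIdx?
    rw [if_neg (by omega), if_pos (by omega)]
    unfold pr
    simp
  | succ k =>
    rw [show ((k + 1 : Nat) : Int) - 1 = (k : Int) by push_cast; ring,
      PySem.List.pySetD_natCast]
    unfold pr
    rw [if_neg (by omega)]
    rfl

theorem bridge_inner (t : List Int) : propagarInner t = sweepA t.length t := by
  unfold propagarInner sweepA
  rw [PySem.List.pyRange_one, show ((t.length : Int) - 0).toNat = t.length by omega,
    List.foldl_map]
  apply foldl_congr_inv (fun x : List Int => x.length = t.length)
  · rfl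
  · intro x k hx hk
    rw [List.mem_range] at hk
    have hkx : k < x.length := by omega
    rw [show (0 : Int) + (k : Int) = (k : Int) by ring, pyGetD_gv, pyGetD_pred x k hkx]
    unfold lstep
    rw [hx]
    split
    · rw [pySetD_pred x k hkx, hx]
    · rfl
  · intro x k hx _
    unfold lstep
    split
    · simpa using hx
    · exact hx

theorem foldl_range_runA (n : Nat) : ∀ (m : Nat) (s : List Int),
    (List.range m).foldl (bodyA n) s = runA n m s := by
  intro m
  induction m with
  | zero => intro s; rfl
  | succ m ih =>
    intro s
    rw [List.range_succ, List.foldl_append, ih]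
    rfl

theorem bridge_A (l : List Int) : propagar l = cleanA l := by
  unfold propagar cleanA
  rw [PySem.List.pyRange_one, show ((l.length : Int) - 0).toNat = l.length by omega,
    List.foldl_map, ← foldl_range_runA]
  apply foldl_congr_inv (fun x : List Int => x.length = l.length)
  · rfl
  · intro x k hx hk
    rw [List.mem_range] at hk
    simp only [show (0 : Int) + (k : Int) = (k : Int) by ring]
    rw [pyGetD_gv]
    unfold bodyA rstepA
    have hcond : (gv x k = 1 ∧ (k : Int) < (l.length : Int) - 1 ∧
        PySem.List.pyGetD x ((k : Int) + 1) 0 = 0) ↔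
        (gv x k = 1 ∧ k + 1 < l.length ∧ gv x (k + 1) = 0) := by
      rw [show ((k : Int) + 1) = ((k + 1 : Nat) : Int) by push_cast; ring, pyGetD_gv]
      constructor
      · rintro ⟨a, b, c⟩; exact ⟨a, by omega, c⟩
      · rintro ⟨a, b, c⟩; exact ⟨a, by omega, c⟩
    simp only [hcond]
    split
    · rw [show ((k : Int) + 1) = ((k + 1 : Nat) : Int) by push_cast; ring,
        PySem.List.pySetD_natCast, bridge_inner]
      congr 1
      simp [hx]
    · rw [bridge_inner, hx]
  · intro x k hx _
    unfold bodyA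
    rw [length_sweepA, length_rstepA, hx]

theorem cstep_fwd_eq (p : List Int × Bool) (k : Nat) :
    (let x := PySem.List.pyGetD p.1 (k : Int) 0
     if x = 1 then (p.1, true)
     else if x = 0 then (if p.2 then (PySem.List.pySetD p.1 (k : Int) 1, p.2) else p)
     else (p.1, false)) = cstep p.1 p.2 k := by
  simp only [pyGetD_gv, PySem.List.pySetD_natCast]
  unfold cstep
  rfl

theorem foldl_range_sweepUp : ∀ (m : Nat) (s : List Int) (c : Bool),
    (List.range m).foldl (fun (p : List Int × Bool) k => cstep p.1 p.2 k) (s, c) =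
      sweepUp m s c := by
  intro m
  induction m with
  | zero => intro s c; rfl
  | succ m ih =>
    intro s c
    rw [List.range_succ, List.foldl_append, ih]
    rfl

theorem foldl_desc_sweepDown : ∀ (m : Nat) (s : List Int) (c : Bool),
    (List.range m).foldl (fun (p : List Int × Bool) k => cstep p.1 p.2 (m - 1 - k)) (s, c) =
      sweepDown m s c := by
  intro m
  induction m with
  | zero => intro s c; rfl
  | succ m ih =>
    intro s c
    rw [List.range_succ_eq_map, List.foldl_cons, List.foldl_map]
    have hb : (fun (p : List Int × Bool) k => cstep p.1 p.2 (m + 1 - 1 - Nat.succ k)) =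
        (fun (p : List Int × Bool) k => cstep p.1 p.2 (m - 1 - k)) := by
      funext p k
      congr 1
      omega
    have hhead : cstep s c (m + 1 - 1 - 0) = cstep s c m := by congr 1
    rw [hb, hhead]
    have : sweepDown (m + 1) s c = sweepDown m (cstep s c m).1 (cstep s c m).2 := rfl
    rw [this, ← ih]

theorem bridge_B (l : List Int) : propagar_alt l = cleanB l := by
  by_cases hn0 : l.length = 0
  · have hl : l = [] := List.length_eq_zero_iff.mp hn0
    subst hl
    rfl
  · have hn : 0 < l.length := by omega
    simp only [propagar_alt, cleanB]
    have hfwd : (PySem.List.pyRange 0 (l.length : Int) 1).foldl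
        (fun (p : List Int × Bool) j =>
          let x := PySem.List.pyGetD p.1 j 0
          if x = 1 then (p.1, true)
          else if x = 0 then (if p.2 then (PySem.List.pySetD p.1 j 1, p.2) else p)
          else (p.1, false)) (l, false) = sweepUp l.length l false := by
      rw [PySem.List.pyRange_one, show ((l.length : Int) - 0).toNat = l.length by omega,
        List.foldl_map, ← foldl_range_sweepUp l.length l false]
      apply foldl_congr_inv (fun _ : List Int × Bool => True) _ _ _ _ trivial
      · intro p k _ _
        rw [show (0 : Int) + (k : Int) = (k : Int) by ring]
        exact cstep_fwd_eq p k
      · intro _ _ _ _; trivial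
    rw [hfwd]
    set f := sweepUp l.length l false with hf
    -- the backward loop over range(2n-1, -1, -1) is two descending passes over the cells
    rw [PySem.List.pyRange_neg_one,
      show ((2 * (l.length : Int) - 1) - (-1)).toNat = 2 * l.length by omega,
      List.foldl_map]
    have hbody : ∀ (p : List Int × Bool) (k : Nat), k ∈ List.range (2 * l.length) →
        (let x := PySem.List.pyGetD p.1
            (PySem.Int.mod (2 * (l.length : Int) - 1 - (k : Int)) (l.length : Int)) 0
         if x = 1 then (p.1, true)
         else if x = 0 then
           (if p.2 then (PySem.List.pySetD p.1
              (PySem.Int.mod (2 * (l.length : Int) - 1 - (k : Int)) (l.length : Int)) 1, p.2)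
            else p)
         else (p.1, false)) = cstep p.1 p.2 ((2 * l.length - 1 - k) % l.length) := by
      intro p k hk
      rw [List.mem_range] at hk
      have hcast : 2 * (l.length : Int) - 1 - (k : Int) = ((2 * l.length - 1 - k : Nat) : Int) := by
        omega
      rw [hcast, PySem.Int.mod_natCast]
      simp only [pyGetD_gv, PySem.List.pySetD_natCast]
      unfold cstep
      rfl
    rw [foldl_congr_inv (fun _ : List Int × Bool => True) _
      (fun (p : List Int × Bool) k => cstep p.1 p.2 ((2 * l.length - 1 - k) % l.length))
      (List.range (2 * l.length)) (f.1, false) trivial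
      (fun p k _ hk => hbody p k hk) (fun _ _ _ _ => trivial)]
    rw [show 2 * l.length = l.length + l.length by ring, List.range_add,
      List.foldl_append, List.foldl_map]
    have hseg1 : (List.range l.length).foldl
        (fun (p : List Int × Bool) k => cstep p.1 p.2 ((l.length + l.length - 1 - k) % l.length))
        (f.1, false) = sweepDown l.length f.1 false := by
      rw [← foldl_desc_sweepDown l.length f.1 false]
      apply foldl_congr_inv (fun _ : List Int × Bool => True) _ _ _ _ trivial
      · intro p k _ hk
        rw [List.mem_range] at hk
        congr 1
        have h1 : l.length + l.length - 1 - k = l.length + (l.length - 1 - k) := by omega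
        rw [h1, Nat.add_mod_left, Nat.mod_eq_of_lt (by omega)]
      · intro _ _ _ _; trivial
    rw [hseg1]
    set d1 := sweepDown l.length f.1 false with hd1
    have hseg2 : (List.range l.length).foldl
        (fun (p : List Int × Bool) k =>
          cstep p.1 p.2 ((l.length + l.length - 1 - (l.length + k)) % l.length)) d1 =
        sweepDown l.length d1.1 d1.2 := by
      rw [← foldl_desc_sweepDown l.length d1.1 d1.2]
      apply foldl_congr_inv (fun _ : List Int × Bool => True) _ _ _ _ trivial
      · intro p k _ hk
        rw [List.mem_range] at hk
        congr 1
        have h1 : l.length + l.length - 1 - (l.length + k) = l.length - 1 - k := by omega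
        rw [h1, Nat.mod_eq_of_lt (by omega)]
      · intro _ _ _ _; trivial
    rw [hseg2]

theorem propagar_eq_alt (lista : List Int) : propagar lista = propagar_alt lista := by
  rw [bridge_A, bridge_B]
  obtain ⟨hsa, hra, hla⟩ := cleanA_sat lista
  obtain ⟨hsb, hrb, hlb⟩ := cleanB_sat lista
  exact steps_unique hsa hsb hra hla hrb hlb

-- ===== VERDICT (by name: the statement is the Claim_ definition above) =====
theorem propagar_spec : Claim_equal_propagar := by
  intro lista _
  unfold Spec_propagar
  exact propagar_eq_alt lista
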